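-- pv_equiv track=rewrite | github.com/amol-ship-it/agi-core | domains/arc/perception_primitives.py | grid_density
-- ===== SOURCE A (Python) =====
-- from collections import Counter
--
-- Grid = list[list[int]]
--
-- def grid_density(grid: Grid) -> int:
--     """Return the percentage of non-background pixels (0-100).
--
--     Useful as a parameterized action input: e.g., scale by density ratio.
--     """
--     if not grid or not grid[0]:
--         return 0
--     h, w = len(grid), len(grid[0])
--     total = h * w
--     flat = [grid[r][c] for r in range(h) for c in range(w)]
--     bg = Counter(flat).most_common(1)[0][0]
--     fg = sum(1 for c in flat if c != bg)
--     return (fg * 100) // total if total > 0 else 0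
-- ===== SOURCE B (Python) =====
-- def grid_density(grid):
--     """Return the percentage of non-background pixels (0-100)."""
--     if not grid or not grid[0]:
--         return 0
--     w = len(grid[0])
--     flat = sorted(x for row in grid for x in row[:w])
--     best = run = 1
--     for prev, cur in zip(flat, flat[1:]):
--         run = run + 1 if cur == prev else 1
--         if run > best:
--             best = run
--     total = len(flat)
--     return ((total - best) * 100) // total
-- ===== Notes on version B (the rewrite author's own statement) =====
-- stated objective: alternative
-- what changed: B does no frequency counting at all: it sorts the flattened cells and obtains the background's multiplicity as the longest run of equal adjacent values in one scan, replacing A's Counter, most_common lookup and second counting pass; fg is then total minus that run length.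
import Mathlib
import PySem

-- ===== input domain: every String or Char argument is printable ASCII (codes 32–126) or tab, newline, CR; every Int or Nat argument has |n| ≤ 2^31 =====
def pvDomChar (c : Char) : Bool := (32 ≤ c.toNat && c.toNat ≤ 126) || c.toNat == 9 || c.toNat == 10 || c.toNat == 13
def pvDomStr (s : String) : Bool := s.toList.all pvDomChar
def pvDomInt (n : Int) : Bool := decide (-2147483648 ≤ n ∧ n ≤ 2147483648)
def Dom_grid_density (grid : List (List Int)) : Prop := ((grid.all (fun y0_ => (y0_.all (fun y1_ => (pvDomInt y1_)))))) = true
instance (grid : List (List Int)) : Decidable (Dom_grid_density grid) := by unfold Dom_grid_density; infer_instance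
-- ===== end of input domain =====

-- B replaces A's Counter + most_common + second counting pass by sorting the flattened
-- cells and taking the background multiplicity as the longest run of equal adjacent
-- values (objective: alternative); proved equal wherever A returns.

-- ===== PORT A =====
-- Counter(flat).most_common(1)[0][0]: first item (insertion order) with maximal count
def pyMostCommon1 (items : List (Int × Int)) : Int :=
  match items with
  | [] => 0
  | p :: rest => (rest.foldl (fun best q => if best.2 < q.2 then q else best) p).1

def grid_density (grid : List (List Int)) : Int :=
  match grid with
  | [] => 0
  | row0 :: _ =>
    if row0 = [] then 0
    else
      let h := grid.length
      let w := row0.length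
      let total : Int := (h : Int) * (w : Int)
      let flat : List Int := (List.range h).flatMap (fun (r : Nat) =>
        (List.range w).map (fun (c : Nat) =>
          PySem.List.pyGetD (PySem.List.pyGetD grid (r : Int) []) (c : Int) 0))
      let bg : Int := pyMostCommon1 (PySem.Dict.counter flat).items
      let fg : Int := flat.foldl (fun acc c => if c ≠ bg then acc + 1 else acc) 0
      if total > 0 then PySem.Int.floordiv (fg * 100) total else 0

-- ===== PORT B =====
def grid_density_alt (grid : List (List Int)) : Int :=
  match grid with
  | [] => 0
  | row0 :: _ =>
    if row0 = [] then 0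
    else
      let w := row0.length
      let flat := PySem.List.sorted
        (grid.flatMap (fun row => PySem.List.slice row none (some (w : Int))))
        (fun x => x) false
      -- for prev, cur in zip(flat, flat[1:]): state = (best, run)
      let br := (flat.zip (PySem.List.slice flat (some 1) none)).foldl
        (fun (s : Int × Int) pc =>
          let run := if pc.2 = pc.1 then s.2 + 1 else 1
          (if run > s.1 then run else s.1, run)) (1, 1)
      let total : Int := (flat.length : Int)
      PySem.Int.floordiv ((total - br.1) * 100) total

-- ===== PRECONDITION & SPEC =====
-- Pre_ excludes exactly the inputs where A raises IndexError: grids whose first row is nonempty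
-- and some row is shorter than it (A indexes every row at 0..len(grid[0])-1).
def Pre_grid_density (grid : List (List Int)) : Prop :=
  grid.headD [] = [] ∨ ∀ row ∈ grid, (grid.headD []).length ≤ row.length
instance (grid : List (List Int)) : Decidable (Pre_grid_density grid) := by
  unfold Pre_grid_density; infer_instance

def pvWitness_grid_density : List (List Int) := [[1, 2], [2, 2]]

def Spec_grid_density (grid : List (List Int)) (out : Int) : Prop := out = grid_density_alt grid
instance (grid : List (List Int)) (out : Int) : Decidable (Spec_grid_density grid out) := by unfold Spec_grid_density; infer_instance

-- ===== CLAIM (what is proved, stated in full; the proofs are below) =====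
def Claim_equal_grid_density : Prop := ∀ (grid : List (List Int)), Dom_grid_density grid → Pre_grid_density grid → Spec_grid_density grid (grid_density grid)

-- ===== LEMMAS AND PROOFS =====

-- the adjacent-pair scan of B's loop, as a structural recursion (proof helper)
def scanFrom (best run prev : Int) : List Int → Int
  | [] => best
  | c :: t =>
    let r := if c = prev then run + 1 else 1
    scanFrom (max best r) r c t

-- B's foldl over zip(flat, flat[1:]) is scanFrom
lemma zip_foldl_eq_scanFrom (t : List Int) : ∀ (a best run : Int),
    (((a :: t).zip t).foldl
      (fun (s : Int × Int) pc =>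
        let run := if pc.2 = pc.1 then s.2 + 1 else 1
        (if run > s.1 then run else s.1, run)) (best, run)).1 = scanFrom best run a t := by
  induction t with
  | nil => intro a best run; simp [scanFrom]
  | cons c t' ih =>
    intro a best run
    simp only [List.zip_cons_cons, List.foldl_cons, scanFrom]
    have hmx : (if (if c = a then run + 1 else 1) > best then (if c = a then run + 1 else 1)
        else best) = max best (if c = a then run + 1 else 1) := by
      by_cases h : (if c = a then run + 1 else 1) > best <;> simp [h] <;> omega
    rw [← hmx]
    exact ih c _ _

-- casting List.count through a cons
lemma count_cons_int (x c : Int) (t : List Int) :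
    (((c :: t).count x : Int)) = (t.count x : Int) + (if x = c then 1 else 0) := by
  by_cases hxc : x = c
  · subst hxc; simp
  · have hcx : ¬ c = x := fun h => hxc h.symm
    simp [hxc, hcx]

-- upper bound: the scan never exceeds a bound dominating best and all relevant counts
lemma scanFrom_le (t : List Int) : ∀ (a best run M : Int), 1 ≤ run →
    best ≤ M → run + (t.count a : Int) ≤ M → (∀ x ∈ t, (t.count x : Int) ≤ M) →
    scanFrom best run a t ≤ M := by
  induction t with
  | nil => intro a best run M _ hb _ _; simpa [scanFrom] using hb
  | cons c t' ih =>
    intro a best run M hrun hb ha ht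
    have hmono : ∀ x : Int, (t'.count x : Int) ≤ ((c :: t').count x : Int) := by
      intro x
      have h := count_cons_int x c t'
      by_cases hxc : x = c
      · rw [if_pos hxc] at h; omega
      · rw [if_neg hxc] at h; omega
    simp only [scanFrom]
    by_cases hc : c = a
    · subst hc
      rw [if_pos rfl]
      have hacnt := count_cons_int c c t'
      rw [if_pos rfl] at hacnt
      apply ih c (max best (run + 1)) (run + 1) M (by omega) (by omega) (by omega)
      intro x hx; exact le_trans (hmono x) (ht x (List.mem_cons_of_mem _ hx))
    · rw [if_neg hc]
      have h1M : (1 : Int) ≤ M := by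
        have h0 : (0 : Int) ≤ ((c :: t').count a : Int) := Int.natCast_nonneg _
        omega
      have hccnt := count_cons_int c c t'
      rw [if_pos rfl] at hccnt
      have hcM := ht c List.mem_cons_self
      apply ih c (max best 1) 1 M le_rfl (by omega) (by omega)
      intro x hx; exact le_trans (hmono x) (ht x (List.mem_cons_of_mem _ hx))

-- lower bounds: best, the running count of a, and every later run are at most the scan result
lemma le_scanFrom (t : List Int) : ∀ (a best run : Int), 1 ≤ run → run ≤ best →
    List.Pairwise (· ≤ ·) (a :: t) →
    best ≤ scanFrom best run a t ∧ run + (t.count a : Int) ≤ scanFrom best run a t ∧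
      ∀ x ∈ t, x ≠ a → (t.count x : Int) ≤ scanFrom best run a t := by
  induction t with
  | nil => intro a best run hrun hrb _; simp [scanFrom]; omega
  | cons c t' ih =>
    intro a best run hrun hrb hpw
    have hpw' : List.Pairwise (· ≤ ·) (c :: t') := hpw.of_cons
    have hac : a ≤ c := (List.pairwise_cons.mp hpw).1 c List.mem_cons_self
    simp only [scanFrom]
    by_cases hc : c = a
    · subst hc
      rw [if_pos rfl]
      have hccnt := count_cons_int c c t'
      rw [if_pos rfl] at hccnt
      obtain ⟨h1, h2, h3⟩ := ih c (max best (run + 1)) (run + 1) (by omega) (by omega) hpw'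
      refine ⟨by omega, by omega, ?_⟩
      intro x hx hxa
      rcases List.mem_cons.mp hx with h | h
      · exact absurd h hxa
      · have hcx := count_cons_int x c t'
        rw [if_neg hxa] at hcx
        have := h3 x h hxa
        omega
    · have halt : a < c := lt_of_le_of_ne hac (fun h => hc h.symm)
      have hct' : ∀ x ∈ t', c ≤ x := (List.pairwise_cons.mp hpw').1
      have hacnt : ((c :: t').count a : Int) = 0 := by
        have hnm : a ∉ c :: t' := by
          intro hmem
          rcases List.mem_cons.mp hmem with h | h
          · exact hc h.symm
          · exact absurd (lt_of_lt_of_le halt (hct' a h)) (lt_irrefl a)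
        simp [List.count_eq_zero_of_not_mem hnm]
      rw [if_neg hc]
      obtain ⟨h1, h2, h3⟩ := ih c (max best 1) 1 le_rfl (by omega) hpw'
      refine ⟨by omega, by omega, ?_⟩
      intro x hx hxa
      by_cases hxc : x = c
      · subst hxc
        have hcx := count_cons_int x x t'
        rw [if_pos rfl] at hcx
        omega
      · rcases List.mem_cons.mp hx with h | h
        · exact absurd h hxc
        · have hcx := count_cons_int x c t'
          rw [if_neg hxc] at hcx
          have := h3 x h hxc
          omega

-- reading the first w entries of a list back off pyGetD over range w
lemma map_range_pyGetD {α : Type} (xs : List α) (w : Nat) (d : α) (hw : w ≤ xs.length) :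
    (List.range w).map (fun (i : Nat) => PySem.List.pyGetD xs (i : Int) d) = xs.take w := by
  apply List.ext_getElem
  · simp [hw]
  · intro i h1 h2
    simp only [List.getElem_map, List.getElem_range, List.getElem_take]
    have hi : i < xs.length := lt_of_lt_of_le (by simpa using h1) hw
    rw [PySem.List.pyGetD_natCast]
    exact List.getD_eq_getElem xs d hi

-- A's flat list is the flatten of the grid's rows truncated to width w
lemma flat_eq_flatten (grid : List (List Int)) (w : Nat)
    (hrect : ∀ row ∈ grid, w ≤ row.length) :
    (List.range grid.length).flatMap (fun (r : Nat) =>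
      (List.range w).map (fun (c : Nat) =>
        PySem.List.pyGetD (PySem.List.pyGetD grid (r : Int) []) (c : Int) 0)) =
    (grid.map (fun row => row.take w)).flatten := by
  rw [List.flatMap_def]
  congr 1
  apply List.ext_getElem
  · simp
  · intro i h1 h2
    simp only [List.getElem_map, List.getElem_range]
    have hi : i < grid.length := by simpa using h2
    have hget : PySem.List.pyGetD grid (i : Int) [] = grid[i] := by
      rw [PySem.List.pyGetD_natCast]
      exact List.getD_eq_getElem grid [] hi
    rw [hget]
    exact map_range_pyGetD _ w 0 (hrect _ (List.getElem_mem _))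

-- the foldl picking the first maximal-count item is a member and maximal
lemma foldl_best_spec (p : Int × Int) (rest : List (Int × Int)) :
    (rest.foldl (fun best q => if best.2 < q.2 then q else best) p) ∈ p :: rest ∧
    ∀ q ∈ p :: rest, q.2 ≤ (rest.foldl (fun best q => if best.2 < q.2 then q else best) p).2 := by
  induction rest generalizing p with
  | nil => simp
  | cons a t ih =>
    simp only [List.foldl_cons]
    obtain ⟨hmem, hmax⟩ := ih (if p.2 < a.2 then a else p)
    have hp'le : p.2 ≤ (if p.2 < a.2 then a else p).2 := by
      by_cases h : p.2 < a.2 <;> simp [h] <;> omega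
    have ha'le : a.2 ≤ (if p.2 < a.2 then a else p).2 := by
      by_cases h : p.2 < a.2 <;> simp [h] <;> omega
    refine ⟨?_, ?_⟩
    · rcases List.mem_cons.mp hmem with h' | h'
      · rw [h']
        by_cases h : p.2 < a.2 <;> simp [h]
      · simp [h']
    · intro q hq
      have hhead := hmax _ (List.mem_cons_self)
      rcases List.mem_cons.mp hq with h' | h'
      · rw [h']; exact le_trans hp'le hhead
      · rcases List.mem_cons.mp h' with h'' | h''
        · rw [h'']; exact le_trans ha'le hhead
        · exact hmax q (List.mem_cons_of_mem _ h'')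

-- length of the flatten of a rectangular grid
lemma flatten_length_rect (grid : List (List Int)) (w : Nat)
    (hrect : ∀ row ∈ grid, row.length = w) :
    grid.flatten.length = grid.length * w := by
  induction grid with
  | nil => simp
  | cons r t ih =>
    simp only [List.flatten_cons, List.length_append, List.length_cons]
    rw [hrect r (by simp), ih (fun row hrow => hrect row (by simp [hrow]))]
    ring

-- the count of A's background colour equals the maximal counter value
lemma count_mostCommon_eq_max (l : List Int) (m : Int) (_hne : l ≠ [])
    (hm : PySem.List.max? (PySem.Dict.counter l).values (fun v => v) = some m) :
    (l.count (pyMostCommon1 (PySem.Dict.counter l).items) : Int) = m := by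
  have hitems := PySem.Dict.items_counter l
  have hset : (PySem.Set.ofList l) ≠ [] := by
    cases l with
    | nil => exact absurd rfl _hne
    | cons x t =>
      intro hcon
      have : x ∈ PySem.Set.ofList (x :: t) := by
        rw [PySem.Set.mem_ofList]; simp
      simp [hcon] at this
  obtain ⟨k0, ks, hks⟩ := List.exists_cons_of_ne_nil hset
  have hitems' : (PySem.Dict.counter l).items =
      (k0, (l.count k0 : Int)) :: ks.map (fun k => (k, (l.count k : Int))) := by
    rw [hitems, hks, List.map_cons]
  obtain ⟨hmem, hmax⟩ := foldl_best_spec (k0, (l.count k0 : Int))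
      (ks.map (fun k => (k, (l.count k : Int))))
  set best := (ks.map (fun k => (k, (l.count k : Int)))).foldl
      (fun best q => if best.2 < q.2 then q else best) (k0, (l.count k0 : Int)) with hbest
  have hbg : pyMostCommon1 (PySem.Dict.counter l).items = best.1 := by
    rw [hitems']; rfl
  have hvalues : (PySem.Dict.counter l).values = ((PySem.Dict.counter l).items).map (·.2) := rfl
  have hbest_item : best ∈ (PySem.Dict.counter l).items := by rw [hitems']; exact hmem
  have hbest_count : best.2 = (l.count best.1 : Int) := by
    rw [hitems] at hbest_item
    obtain ⟨k, _, hk⟩ := List.mem_map.mp hbest_item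
    rw [← hk]
  have hbest_val : best.2 ∈ (PySem.Dict.counter l).values := by
    rw [hvalues]; exact List.mem_map.mpr ⟨best, hbest_item, rfl⟩
  have hle1 : best.2 ≤ m := PySem.List.max?_isMax hm best.2 hbest_val
  have hle2 : m ≤ best.2 := by
    have hmmem := PySem.List.max?_mem hm
    rw [hvalues] at hmmem
    obtain ⟨q, hq, hqeq⟩ := List.mem_map.mp hmmem
    rw [hitems'] at hq
    exact hqeq ▸ hmax q hq
  rw [hbg, ← hbest_count]
  omega

-- count of elements different from v
lemma countP_ne_eq_sub (l : List Int) (v : Int) :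
    l.countP (fun c => decide (c ≠ v)) = l.length - l.count v := by
  have h := List.length_eq_countP_add_countP (l := l) (fun c => decide (c = v))
  have hc : l.count v = l.countP (fun c => decide (c = v)) := by
    unfold List.count
    apply List.countP_congr
    intro a _
    simp
  have he : l.countP (fun a => decide ¬(decide (a = v)) = true) =
      l.countP (fun c => decide (c ≠ v)) := by
    apply List.countP_congr
    intro a _
    by_cases hav : a = v <;> simp [hav]
  omega

-- B's longest-run scan over the sorted list equals the maximal counter value of l
lemma scan_sorted_eq_max (l : List Int) (m : Int)
    (hm : PySem.List.max? (PySem.Dict.counter l).values (fun v => v) = some m) :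
    ∀ a t, PySem.List.sorted l (fun x => x) false = a :: t →
    scanFrom 1 1 a t = m := by
  intro a t hs
  have hperm : (a :: t).Perm l := hs ▸ PySem.List.sorted_perm l (fun x => x) false
  have hcnt : ∀ x : Int, (a :: t).count x = l.count x := fun x => hperm.count_eq x
  have hvalues : (PySem.Dict.counter l).values = ((PySem.Dict.counter l).items).map (·.2) := rfl
  have hval_mem : ∀ x ∈ l, (l.count x : Int) ∈ (PySem.Dict.counter l).values := by
    intro x hx
    rw [hvalues, PySem.Dict.items_counter]
    rw [List.map_map]
    exact List.mem_map.mpr ⟨x, (PySem.Set.mem_ofList l x).mpr hx, rfl⟩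
  have hub : ∀ x ∈ l, (l.count x : Int) ≤ m := fun x hx =>
    PySem.List.max?_isMax hm _ (hval_mem x hx)
  obtain ⟨bg, hbg_mem, hbg_eq⟩ : ∃ bg ∈ l, m = (l.count bg : Int) := by
    have hmmem := PySem.List.max?_mem hm
    rw [hvalues, PySem.Dict.items_counter, List.map_map] at hmmem
    obtain ⟨k, hk, hkeq⟩ := List.mem_map.mp hmmem
    exact ⟨k, (PySem.Set.mem_ofList l k).mp hk, hkeq.symm⟩
  have hpw : List.Pairwise (· ≤ ·) (a :: t) := by
    have h := PySem.List.sorted_pairwise (xs := l) (key := fun x => x)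
    rw [hs] at h
    simpa using h
  have hmem_iff : ∀ x : Int, x ∈ a :: t ↔ x ∈ l := fun x => hperm.mem_iff
  -- upper bound
  have hscan_le : scanFrom 1 1 a t ≤ m := by
    apply scanFrom_le t a 1 1 m (le_refl 1)
    · have h1 : (1 : Int) ≤ (l.count bg : Int) := by
        have : 1 ≤ l.count bg := List.one_le_count_iff.mpr hbg_mem
        exact_mod_cast this
      omega
    · have hca := count_cons_int a a t
      rw [if_pos rfl] at hca
      have ha := hub a ((hmem_iff a).mp (List.mem_cons_self))
      rw [← hcnt a] at ha
      omega
    · intro x hx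
      have hxl : x ∈ l := (hmem_iff x).mp (List.mem_cons_of_mem _ hx)
      have h1 := hub x hxl
      rw [← hcnt x] at h1
      have hcx := count_cons_int x a t
      by_cases hxa : x = a
      · rw [if_pos hxa] at hcx; omega
      · rw [if_neg hxa] at hcx; omega
  -- lower bound
  have hge : m ≤ scanFrom 1 1 a t := by
    obtain ⟨h1, h2, h3⟩ := le_scanFrom t a 1 1 (le_refl 1) (le_refl 1) hpw
    have hbg_s : bg ∈ a :: t := (hmem_iff bg).mpr hbg_mem
    rw [hbg_eq, ← hcnt bg]
    by_cases hba : bg = a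
    · subst hba
      have hcb := count_cons_int bg bg t
      rw [if_pos rfl] at hcb
      omega
    · have hbt : bg ∈ t := by
        rcases List.mem_cons.mp hbg_s with h | h
        · exact absurd h hba
        · exact h
      have hcb := count_cons_int bg a t
      rw [if_neg hba] at hcb
      rw [hcb]
      simpa using h3 bg hbt hba
  omega

-- ===== VERDICT (by name: the statement is the Claim_ definition above) =====
theorem grid_density_spec : Claim_equal_grid_density := by
  intro grid _ hpre
  unfold Spec_grid_density grid_density grid_density_alt
  cases grid with
  | nil => rfl
  | cons row0 rest =>
    by_cases h0 : row0 = []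
    · simp [h0]
    · simp only [if_neg h0]
      set g := row0 :: rest with hg
      have hrect : ∀ row ∈ g, row0.length ≤ row.length := by
        intro row hrow
        rcases hpre with hpre | hpre
        · exact absurd (by simpa using hpre) h0
        · simpa using hpre row hrow
      set w := row0.length with hw
      set l := (g.map (fun row => row.take w)).flatten with hl
      have hflat : (List.range g.length).flatMap (fun (r : Nat) =>
          (List.range w).map (fun (c : Nat) =>
            PySem.List.pyGetD (PySem.List.pyGetD g (r : Int) []) (c : Int) 0)) = l :=
        flat_eq_flatten g w hrect
      have hflatB : g.flatMap (fun row => PySem.List.slice row none (some (w : Int))) = l := by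
        rw [List.flatMap_def]
        simp only [PySem.List.slice_to_natCast]
        rfl
      have hrect' : ∀ row ∈ g.map (fun row => row.take w), row.length = w := by
        intro row hrow
        obtain ⟨r, hr, hrw⟩ := List.mem_map.mp hrow
        rw [← hrw, List.length_take]
        exact Nat.min_eq_left (hrect r hr)
      have hlen : l.length = g.length * w := by
        rw [hl, flatten_length_rect _ w hrect', List.length_map]
      have hwpos : 0 < w := List.length_pos_of_ne_nil h0
      have hlenpos : 0 < l.length := by
        rw [hl, hg]
        simp only [List.map_cons, List.flatten_cons, List.length_append, List.length_take]
        omega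
      have hne : l ≠ [] := by
        intro hcon
        rw [hcon] at hlenpos
        simp at hlenpos
      have hvne : (PySem.Dict.counter l).values ≠ [] := by
        have : (PySem.Dict.counter l).items ≠ [] := by
          rw [PySem.Dict.items_counter]
          intro hcon
          cases hfl : l with
          | nil => exact hne hfl
          | cons x t =>
            have : x ∈ PySem.Set.ofList (x :: t) := by
              rw [PySem.Set.mem_ofList]; simp
            rw [hfl] at hcon
            simp at hcon
            simp [hcon] at this
        intro hcon
        apply this
        have hv : (PySem.Dict.counter l).values =
            ((PySem.Dict.counter l).items).map (·.2) := rfl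
        rw [hv] at hcon
        exact List.map_eq_nil_iff.mp hcon
      obtain ⟨m, hm⟩ : ∃ m, PySem.List.max? (PySem.Dict.counter l).values (fun v => v) = some m := by
        cases hmx : PySem.List.max? (PySem.Dict.counter l).values (fun v => v) with
        | none => exact absurd ((PySem.List.max?_eq_none_iff _ _).mp hmx) hvne
        | some m => exact ⟨m, rfl⟩
      -- sorted list is nonempty
      have hsne : PySem.List.sorted l (fun x => x) false ≠ [] := by
        intro hcon
        exact hne ((PySem.List.sorted_eq_nil_iff _ _ _).mp hcon)
      obtain ⟨a, t, hs⟩ := List.exists_cons_of_ne_nil hsne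
      have hslen : (PySem.List.sorted l (fun x => x) false).length = l.length :=
        (PySem.List.sorted_perm l (fun x => x) false).length_eq
      -- A's value
      have hcount := count_mostCommon_eq_max l m hne hm
      set bg := pyMostCommon1 (PySem.Dict.counter l).items with hbgdef
      have hfg : l.foldl (fun acc c => if c ≠ bg then acc + 1 else acc) (0 : Int) =
          (l.length : Int) - m := by
        have := PySem.List.foldl_count_if (fun c => decide (c ≠ bg)) l 0
        simp only [decide_eq_true_eq] at this
        rw [this, countP_ne_eq_sub]
        have hcle : l.count bg ≤ l.length := List.count_le_length
        push_cast [Nat.cast_sub hcle]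
        omega
      -- B's value
      have hscan := scan_sorted_eq_max l m hm a t hs
      have hzip : (((a :: t).zip (PySem.List.slice (a :: t) (some 1) none)).foldl
          (fun (s : Int × Int) pc =>
            let run := if pc.2 = pc.1 then s.2 + 1 else 1
            (if run > s.1 then run else s.1, run)) (1, 1)).1 = m := by
        rw [PySem.List.slice_from_one]
        simp only [List.tail_cons]
        rw [zip_foldl_eq_scanFrom t a 1 1]
        exact hscan
      have htotal : ((g.length : Int) * (w : Int)) = (l.length : Int) := by
        rw [hlen]; push_cast; ring
      have hpos : (0 : Int) < (g.length : Int) * (w : Int) := by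
        rw [htotal]
        exact_mod_cast hlenpos
      rw [hflatB, hs] at *
      simp only [hflat, hzip]
      rw [if_pos hpos, htotal]
      have hlt : ((a :: t).length : Int) = (l.length : Int) := by
        rw [← hs] at *
        exact_mod_cast hslen
      rw [hlt, ← hbgdef, hfg]
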